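-- pv_equiv track=rewrite | github.com/pypi-data/pypi-mirror-96 | packages/lbplatformutils/LbPlatformUtils-4.3.4-py2.py3-none-any.whl/LbPlatformUtils/__init__.py | normal_name
-- ===== SOURCE A (Python) =====
-- def normal_name(name, aliases, default=None):
--     '''
--     Return the _normalized_ name corresponding to the requested one, based on
--     the aliases list.  If not found return the original name, or, if specified,
--     'default'.
--
--     >>> aliases = {'a': ['1', '2', '3'],
--     ...            'b': []}
--     >>> normal_name('2', aliases)
--     'a'
--     >>> normal_name('b', aliases)
--     'b'
--     >>> normal_name('c', aliases)
--     'c'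
--     >>> normal_name('c', aliases, 'unknown')
--     'unknown'
--     '''
--     if name in aliases:
--         return name
--     else:
--         # not a reference platform
--         for k, v in aliases.items():
--             if name in v:
--                 return k
--         # not supported nor equivalent
--         return default or name
-- ===== SOURCE B (Python) =====
-- def normal_name(name, aliases, default=None):
--     if name in aliases:
--         return name
--     index = {}
--     for k, v in aliases.items():
--         for x in v:
--             index.setdefault(x, k)
--     return index.get(name, default or name)
-- ===== Notes on version B (the rewrite author's own statement) =====
-- stated objective: alternative
-- what changed: replaces the short-circuiting scan over aliases.items() (membership test inside each value list) by building a reverse-lookup dict once with setdefault (first-owning key wins) followed by a single dict lookup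
import Mathlib
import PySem

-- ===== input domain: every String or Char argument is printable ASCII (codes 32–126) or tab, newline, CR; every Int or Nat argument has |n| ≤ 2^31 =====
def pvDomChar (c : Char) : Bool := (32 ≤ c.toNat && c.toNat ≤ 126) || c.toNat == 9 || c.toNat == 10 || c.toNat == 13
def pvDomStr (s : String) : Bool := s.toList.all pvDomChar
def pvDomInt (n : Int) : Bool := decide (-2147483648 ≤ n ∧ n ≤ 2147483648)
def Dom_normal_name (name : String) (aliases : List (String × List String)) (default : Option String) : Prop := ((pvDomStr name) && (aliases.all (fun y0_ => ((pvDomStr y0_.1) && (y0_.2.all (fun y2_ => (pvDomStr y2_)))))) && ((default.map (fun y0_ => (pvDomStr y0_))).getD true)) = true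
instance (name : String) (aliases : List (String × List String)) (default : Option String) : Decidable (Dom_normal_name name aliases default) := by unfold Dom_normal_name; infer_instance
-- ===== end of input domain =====

-- B replaces A's short-circuiting scan over aliases.items() by a reverse-lookup dict
-- built once with setdefault (first-owning key wins) and a single lookup (objective: alternative).

-- ===== PORT A =====
-- the for-loop with early return: first key whose value list contains name
def nnLoop (name : String) : List (String × List String) → Option String
  | [] => none
  | (k, v) :: rest => if v.contains name then some k else nnLoop name rest

-- `default or name` (falsy fallback: None and "" both give name)
def nnFallback (name : String) (default : Option String) : String :=
  match default with
  | some s => if s == "" then name else s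
  | none => name

def normal_name (name : String) (aliases : List (String × List String)) (default : Option String) : String :=
  let d := PySem.Dict.ofList aliases
  if d.contains name then name
  else
    match nnLoop name d.items with
    | some k => k
    | none => nnFallback name default

-- ===== PORT B =====
-- reverse index: for each (k, v), index.setdefault(x, k) for x in v
def nnIndex (items : List (String × List String)) : PySem.Dict String String :=
  items.foldl (fun d kv => kv.2.foldl (fun d x => d.setdefault x kv.1) d) PySem.Dict.empty

def normal_name_alt (name : String) (aliases : List (String × List String)) (default : Option String) : String :=
  let d := PySem.Dict.ofList aliases
  if d.contains name then name
  else (nnIndex d.items).getD name (nnFallback name default)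

-- ===== PRECONDITION & SPEC =====
def Spec_normal_name (name : String) (aliases : List (String × List String)) (default : Option String) (out : String) : Prop := out = normal_name_alt name aliases default
instance (name : String) (aliases : List (String × List String)) (default : Option String) (out : String) : Decidable (Spec_normal_name name aliases default out) := by unfold Spec_normal_name; infer_instance

-- ===== CLAIM (what is proved, stated in full; the proofs are below) =====
def Claim_equal_normal_name : Prop := ∀ (name : String) (aliases : List (String × List String)) (default : Option String), Dom_normal_name name aliases default → Spec_normal_name name aliases default (normal_name name aliases default)

-- ===== LEMMAS AND PROOFS =====

-- inner loop: setdefault over a value list, lookup afterwards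
theorem nnInner_get? (name k : String) (v : List String) (d : PySem.Dict String String) :
    (v.foldl (fun d x => d.setdefault x k) d).get? name =
      match d.get? name with
      | some y => some y
      | none => if v.contains name then some k else none := by
  induction v generalizing d with
  | nil => cases h : d.get? name <;> simp [h]
  | cons x xs ih =>
    simp only [List.foldl_cons, ih]
    by_cases hc : d.contains x = true
    · rw [PySem.Dict.setdefault_of_contains _ _ hc]
      cases hdn : d.get? name with
      | some y => simp
      | none =>
        have hne : name ≠ x := by
          intro h; subst h
          rw [PySem.Dict.contains_eq_isSome_get?, hdn] at hc; simp at hc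
        simp [hne]
    · rw [PySem.Dict.setdefault_of_not_contains _ _ (by simpa using hc)]
      by_cases hxe : x = name
      · subst hxe
        rw [PySem.Dict.get?_insert_self]
        have hdn : d.get? x = none := by
          rw [PySem.Dict.contains_eq_isSome_get?] at hc
          cases h : d.get? x with
          | none => rfl
          | some y => rw [h] at hc; simp at hc
        simp [hdn]
      · rw [PySem.Dict.get?_insert_of_ne _ _ (fun h => hxe h.symm)]
        cases d.get? name with
        | some y => simp
        | none =>
          have hne : name ≠ x := fun h => hxe h.symm
          simp [hne]

-- outer loop: the index lookup equals A's first-match scan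
theorem nnIndex_get?_aux (name : String) (l : List (String × List String)) (d : PySem.Dict String String) :
    (l.foldl (fun d kv => kv.2.foldl (fun d x => d.setdefault x kv.1) d) d).get? name =
      match d.get? name with
      | some y => some y
      | none => nnLoop name l := by
  induction l generalizing d with
  | nil => cases h : d.get? name <;> simp [h, nnLoop]
  | cons kv rest ih =>
    simp only [List.foldl_cons, ih, nnInner_get?]
    cases d.get? name with
    | some y => simp
    | none =>
      simp only [nnLoop]
      by_cases h : name ∈ kv.2
      · simp [h]
      · simp [h]

theorem nnIndex_get? (name : String) (l : List (String × List String)) :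
    (nnIndex l).get? name = nnLoop name l := by
  rw [nnIndex, nnIndex_get?_aux]
  simp

-- ===== VERDICT (by name: the statement is the Claim_ definition above) =====
theorem normal_name_spec : Claim_equal_normal_name := by
  intro name aliases default _
  unfold Spec_normal_name normal_name normal_name_alt
  by_cases hc : (PySem.Dict.ofList aliases).contains name = true
  · simp [hc]
  · simp only [eq_false_of_ne_true hc, if_neg Bool.false_ne_true,
      PySem.Dict.getD_eq_get?_getD, nnIndex_get?]
    cases nnLoop name (PySem.Dict.ofList aliases).items <;> simp
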